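-- pv_equiv track=rewrite | github.com/medmar22/DE-SomalifuscatorV2 | deobfuscator.py | final_cleanup
-- ===== SOURCE A (Python) =====
-- from typing import List, Dict, Optional, Any, Union
--
-- def final_cleanup(lines: List[str]) -> List[str]:
--     """Basic cleanup: remove extra empty lines and leading/trailing whitespace."""
--     cleaned = []
--     last_line_empty = True
--     for line in lines:
--         stripped = line.strip() # Remove leading/trailing whitespace first
--         if stripped:
--             cleaned.append(stripped) # Add the content line
--             last_line_empty = False
--         elif not last_line_empty:
--             # Only add an empty line if the previous line was not empty
--             cleaned.append("") # Add a single empty line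
--             last_line_empty = True
--     # Remove potential trailing empty line added by loop logic
--     if cleaned and cleaned[-1] == "":
--         cleaned.pop()
--     return cleaned
-- ===== SOURCE B (Python) =====
-- def final_cleanup(lines):
--     """Basic cleanup: remove extra empty lines and leading/trailing whitespace."""
--     stripped = [ln.strip() for ln in lines]
--     out = []
--     i = 0
--     n = len(stripped)
--     while i < n:
--         j = i
--         while j < n and bool(stripped[j]) == bool(stripped[i]):
--             j += 1
--         if stripped[i]:
--             out.extend(stripped[i:j])
--         else:
--             out.append("")
--         i = j
--     if out and out[0] == "":
--         out = out[1:]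
--     if out and out[-1] == "":
--         out = out[:-1]
--     return out
-- ===== Notes on version B (the rewrite author's own statement) =====
-- stated objective: alternative
-- what changed: Replaces A's single stateful pass with a last-line-empty flag by a map-then-group-then-trim decomposition: strip all lines, scan maximal runs of equal blank/non-blank key (emitting non-blank runs whole and one "" per blank run), then trim one leading and one trailing "".
import Mathlib
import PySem

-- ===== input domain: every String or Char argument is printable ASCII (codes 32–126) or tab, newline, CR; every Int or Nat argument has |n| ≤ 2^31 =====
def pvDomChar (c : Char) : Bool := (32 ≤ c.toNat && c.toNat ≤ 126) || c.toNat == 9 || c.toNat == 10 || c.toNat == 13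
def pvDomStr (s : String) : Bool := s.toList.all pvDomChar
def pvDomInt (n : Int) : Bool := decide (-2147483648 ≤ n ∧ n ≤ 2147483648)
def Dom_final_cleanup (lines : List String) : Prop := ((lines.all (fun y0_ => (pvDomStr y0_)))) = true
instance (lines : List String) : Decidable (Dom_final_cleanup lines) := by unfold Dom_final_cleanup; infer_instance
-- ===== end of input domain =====

-- B replaces A's stateful flag-tracking pass by map-strip, then run/group scanning
-- (each maximal run of blank lines becomes one ""), then trimming one leading and
-- one trailing "" — objective: a different (idiomatic map/group/trim) decomposition.

-- ===== PORT A =====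
-- one iteration of A's loop: state = (cleaned, last_line_empty)
def pvStepA (st : List String × Bool) (line : String) : List String × Bool :=
  let stripped := PySem.Str.strip line
  if stripped ≠ "" then (st.1 ++ [stripped], false)
  else if !st.2 then (st.1 ++ [""], true)
  else st

def final_cleanup (lines : List String) : List String :=
  let st := lines.foldl pvStepA ([], true)
  let cleaned := st.1
  if cleaned ≠ [] ∧ cleaned.getLast? = some "" then cleaned.dropLast else cleaned

-- ===== PORT B =====
-- run/group scan: the outer while loop of Source B; the inner `j` scan is takeWhile/dropWhile
def pvRuns : List String → List String
  | [] => []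
  | s :: rest =>
      let run := rest.takeWhile (fun t => (!(t == "")) == (!(s == "")))
      let tail := rest.dropWhile (fun t => (!(t == "")) == (!(s == "")))
      (if s ≠ "" then s :: run else [""]) ++ pvRuns tail
termination_by l => l.length
decreasing_by
  simp only [List.length_cons]
  exact Nat.lt_succ_of_le (List.length_dropWhile_le _ _)

def pvTrimHead (l : List String) : List String :=
  if l ≠ [] ∧ l.head? = some "" then l.tail else l

def pvTrimTail (l : List String) : List String :=
  if l ≠ [] ∧ l.getLast? = some "" then l.dropLast else l

def final_cleanup_alt (lines : List String) : List String :=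
  let stripped := lines.map PySem.Str.strip
  pvTrimTail (pvTrimHead (pvRuns stripped))

-- ===== PRECONDITION & SPEC =====
def Spec_final_cleanup (lines : List String) (out : List String) : Prop := out = final_cleanup_alt lines
instance (lines : List String) (out : List String) : Decidable (Spec_final_cleanup lines out) := by unfold Spec_final_cleanup; infer_instance

-- ===== CLAIM (what is proved, stated in full; the proofs are below) =====
def Claim_equal_final_cleanup : Prop := ∀ (lines : List String), Dom_final_cleanup lines → Spec_final_cleanup lines (final_cleanup lines)

-- ===== LEMMAS AND PROOFS =====

-- abstract description of A's loop output on an already-stripped list, with flag e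
def pvBody : List String → Bool → List String
  | [], _ => []
  | s :: rest, e =>
      if s ≠ "" then s :: pvBody rest false
      else if !e then "" :: pvBody rest true
      else pvBody rest true

-- flag after A's loop (needed to carry the fold state through the induction)
def pvFlag : List String → Bool → Bool
  | [], e => e
  | s :: rest, e => if s ≠ "" then pvFlag rest false
      else if !e then pvFlag rest true else pvFlag rest true

theorem pv_pred_blank :
    (fun t : String => (!(t == "")) == (!(("" : String) == ""))) = (fun t : String => t == "") := by
  funext t; simp

theorem pv_pred_nonblank (s : String) (hs : s ≠ "") :
    (fun t : String => (!(t == "")) == (!(s == ""))) = (fun t : String => !(t == "")) := by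
  have hb : (s == "") = false := beq_eq_false_iff_ne.mpr hs
  funext t; simp [hb]

theorem pv_fold_eq (lines : List String) : ∀ (acc : List String) (e : Bool),
    lines.foldl pvStepA (acc, e)
    = (acc ++ pvBody (lines.map PySem.Str.strip) e,
       pvFlag (lines.map PySem.Str.strip) e) := by
  induction lines with
  | nil => intro acc e; simp [pvBody, pvFlag]
  | cons l rest ih =>
      intro acc e
      simp only [List.foldl_cons, List.map_cons]
      by_cases h : PySem.Str.strip l = ""
      · by_cases he : e
        · subst he
          rw [show pvStepA (acc, true) l = (acc, true) from by simp [pvStepA, h]]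
          rw [ih]; simp [pvBody, pvFlag, h]
        · have he' : e = false := by simpa using he
          subst he'
          rw [show pvStepA (acc, false) l = (acc ++ [""], true) from by simp [pvStepA, h]]
          rw [ih]; simp [pvBody, pvFlag, h]
      · rw [show pvStepA (acc, e) l = (acc ++ [PySem.Str.strip l], false) from by
            simp [pvStepA, h]]
        rw [ih]; simp [pvBody, pvFlag, h]

theorem pv_trimHead_runs (rest : List String) :
    pvTrimHead (pvRuns rest) = pvRuns (rest.dropWhile (fun t => t == "")) := by
  cases rest with
  | nil => simp [pvRuns, pvTrimHead]
  | cons t rs =>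
      by_cases h : t = ""
      · subst h
        rw [pvRuns, pv_pred_blank]
        simp [pvTrimHead]
      · have hb : (t == "") = false := beq_eq_false_iff_ne.mpr h
        rw [List.dropWhile_cons]
        simp only [hb, Bool.false_eq_true, if_false]
        rw [pvRuns, pv_pred_nonblank t h]
        simp [pvTrimHead, h]

theorem pv_runs_nonblank_split (rest : List String) :
    pvRuns rest = rest.takeWhile (fun t => !(t == ""))
        ++ pvRuns (rest.dropWhile (fun t => !(t == ""))) := by
  induction rest with
  | nil => simp [pvRuns]
  | cons t rs ih =>
      by_cases h : t = ""
      · subst h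
        simp
      · rw [pvRuns, pv_pred_nonblank t h]
        simp only [List.takeWhile_cons, List.dropWhile_cons]
        simp [h]

theorem pv_body_eq_runs (n : Nat) : ∀ (ss : List String), ss.length ≤ n →
    pvBody ss false = pvRuns ss ∧ pvBody ss true = pvTrimHead (pvRuns ss) := by
  induction n with
  | zero =>
      intro ss h
      have : ss = [] := List.eq_nil_of_length_eq_zero (Nat.le_zero.mp h)
      subst this; simp [pvBody, pvRuns, pvTrimHead]
  | succ n ih =>
      intro ss h
      cases ss with
      | nil => simp [pvBody, pvRuns, pvTrimHead]
      | cons s rest =>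
          have hr : rest.length ≤ n := Nat.le_of_succ_le_succ h
          have ihrest := ih rest hr
          by_cases hs : s = ""
          · subst hs
            have hbt : pvBody rest true = pvRuns (rest.dropWhile (fun t => t == "")) := by
              rw [ihrest.2, pv_trimHead_runs]
            constructor
            · rw [show pvBody ("" :: rest) false = "" :: pvBody rest true from by
                  simp [pvBody]]
              rw [pvRuns, pv_pred_blank, hbt]
              simp
            · rw [show pvBody ("" :: rest) true = pvBody rest true from by
                  simp [pvBody]]
              rw [hbt, pv_trimHead_runs]
              simp
          · have key : ∀ e, pvBody (s :: rest) e = s :: pvBody rest false := by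
              intro e; simp [pvBody, hs]
            have hruns : pvRuns (s :: rest)
                = s :: (rest.takeWhile (fun t => !(t == ""))
                    ++ pvRuns (rest.dropWhile (fun t => !(t == "")))) := by
              rw [pvRuns, pv_pred_nonblank s hs]; simp [hs]
            have hbody : pvBody rest false = pvRuns rest := ihrest.1
            constructor
            · rw [key, hbody, hruns, ← pv_runs_nonblank_split]
            · rw [key, hbody, hruns, ← pv_runs_nonblank_split]
              simp [pvTrimHead, hs]

-- ===== VERDICT (by name: the statement is the Claim_ definition above) =====
theorem final_cleanup_spec : Claim_equal_final_cleanup := by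
  intro lines _
  show final_cleanup lines = final_cleanup_alt lines
  unfold final_cleanup final_cleanup_alt
  rw [pv_fold_eq]
  have := (pv_body_eq_runs (lines.map PySem.Str.strip).length _ le_rfl).2
  simp only [List.nil_append]
  rw [this]
  rfl
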